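-- pv_equiv track=rewrite | github.com/vishnupsatish/dmoj-practice | dmpg16b6.py | d_n
-- ===== SOURCE A (Python) =====
-- def d_n(no):
--     bi = ''
--     while no != 0:
--         if no == 1:
--             bi = bi + '1'
--             break
--         if no % 2 == 1:
--             no = no // -2 + 1
--             bi = bi + '1'
--         else:
--             no = no // -2
--             bi = bi + '0'
--
--     return bi[::-1]
-- ===== SOURCE B (Python) =====
-- def d_n(no):
--     # Closed-form negabinary: with M an alternating-bit mask 0b1010...10 wide
--     # enough to cover the representation, (no + M) ^ M is the non-negative
--     # integer whose ordinary binary digits are the negabinary digits of no.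
--     if no == 0:
--         return ''
--     k = abs(no).bit_length() // 2 + 2
--     M = 2 * (4 ** k - 1) // 3          # 0b1010...10 with k one-bits
--     return bin((no + M) ^ M)[2:]
-- ===== Notes on version B (the rewrite author's own statement) =====
-- stated objective: alternative
-- what changed: Replaces A's per-digit while-loop (parity branches, string accumulator, final reversal) with the closed-form negabinary bit trick: build an alternating-bit mask M sized from bit_length, return bin((no+M)^M)[2:].
import Mathlib
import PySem

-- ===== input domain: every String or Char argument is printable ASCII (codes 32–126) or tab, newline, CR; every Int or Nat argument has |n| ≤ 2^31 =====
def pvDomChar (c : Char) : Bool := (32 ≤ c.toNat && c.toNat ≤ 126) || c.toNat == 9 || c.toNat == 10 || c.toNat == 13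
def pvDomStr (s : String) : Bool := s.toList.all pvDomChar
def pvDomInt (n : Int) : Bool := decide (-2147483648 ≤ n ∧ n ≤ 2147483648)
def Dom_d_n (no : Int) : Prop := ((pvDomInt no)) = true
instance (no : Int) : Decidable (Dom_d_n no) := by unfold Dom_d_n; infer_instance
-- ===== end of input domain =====

-- B replaces A's per-digit loop with the closed-form negabinary mask trick
-- ((no + M) ^ M with M = 0b1010...10): an alternative algorithm, not claimed faster.

-- ===== PORT A =====
-- Python str accumulator modeled as its code-point list; bi[::-1] is PySem slice? with step -1.
-- The while-loop is a structural recursion on a fuel that bounds its iteration count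
-- (each pass strictly shrinks 2*|no| + [no < 0], proved below in dnLoop_eq); the body is A's.
def dnLoop (fuel : Nat) (no : Int) (bi : List Char) : List Char :=
  match fuel with
  | 0 => bi
  | fuel + 1 =>
    if no = 0 then bi
    else if no = 1 then bi ++ ['1']
    else if PySem.Int.mod no 2 = 1 then
      dnLoop fuel (PySem.Int.floordiv no (-2) + 1) (bi ++ ['1'])
    else
      dnLoop fuel (PySem.Int.floordiv no (-2)) (bi ++ ['0'])

def d_n (no : Int) : String :=
  String.ofList ((PySem.List.slice? (dnLoop (2 * no.natAbs + 2) no []) none none (-1)).getD [])  -- step -1 ≠ 0: never none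

-- ===== PORT B =====
def d_n_alt (no : Int) : String :=
  if no = 0 then "" else
    let k : Nat := PySem.Int.bitLength no / 2 + 2          -- abs(no).bit_length() // 2 + 2 (bitLength reads |no|)
    let M : Int := PySem.Int.floordiv (2 * (4 ^ k - 1)) 3  -- 2 * (4**k - 1) // 3
    PySem.Str.slice (PySem.Int.pyBin (PySem.Int.bxor (no + M) M)) (some 2) none  -- bin(x)[2:]

-- ===== PRECONDITION & SPEC =====
def Spec_d_n (no : Int) (out : String) : Prop := out = d_n_alt no
instance (no : Int) (out : String) : Decidable (Spec_d_n no out) := by unfold Spec_d_n; infer_instance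

-- ===== CLAIM (what is proved, stated in full; the proofs are below) =====
def Claim_equal_d_n : Prop := ∀ (no : Int), Dom_d_n no → Spec_d_n no (d_n no)

-- ===== LEMMAS AND PROOFS =====

-- fdiv/fmod facts used throughout
theorem pvStepFacts (no : Int) :
    (PySem.Int.mod no 2 = 0 ∨ PySem.Int.mod no 2 = 1) ∧
    no = PySem.Int.mod no 2 + (-2) * (PySem.Int.floordiv no (-2) + (PySem.Int.mod no 2).toNat) := by
  have h1 := PySem.Int.floordiv_mul_add_mod no (-2)
  have h2 := PySem.Int.mod_neg_bounds no (show (-2:Int) < 0 by norm_num)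
  have h3 := PySem.Int.floordiv_mul_add_mod no 2
  have h4 := PySem.Int.mod_nonneg no (show (0:Int) < 2 by norm_num)
  have h5 := PySem.Int.mod_lt no (show (0:Int) < 2 by norm_num)
  omega

-- the canonical negabinary digit recursion (LSB first)
def negStep (no : Int) : Int :=
  if PySem.Int.mod no 2 = 1 then PySem.Int.floordiv no (-2) + 1 else PySem.Int.floordiv no (-2)

theorem negStep_decr (no : Int) (h0 : no ≠ 0) :
    2 * (negStep no).natAbs + (if negStep no < 0 then 1 else 0) <
      2 * no.natAbs + (if no < 0 then 1 else 0) := by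
  obtain ⟨h1, h2⟩ := pvStepFacts no
  unfold negStep
  split_ifs <;> omega

def negDigits (no : Int) : List Nat :=
  if h : no = 0 then [] else (PySem.Int.mod no 2).toNat :: negDigits (negStep no)
termination_by 2 * no.natAbs + (if no < 0 then 1 else 0)
decreasing_by exact negStep_decr no h

theorem negStep_eq (no : Int) : no = (PySem.Int.mod no 2 : Int) - 2 * negStep no := by
  have h := pvStepFacts no
  unfold negStep
  split_ifs <;> omega

theorem negDigits_zero : negDigits 0 = [] := by
  rw [negDigits]; simp

theorem negDigits_cons (no : Int) (h : no ≠ 0) :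
    negDigits no = (PySem.Int.mod no 2).toNat :: negDigits (negStep no) := by
  rw [negDigits]; simp [h]

theorem negDigits_one : negDigits 1 = [1] := by
  have h1 : PySem.Int.mod 1 2 = 1 := by decide
  have h2 : negStep 1 = 0 := by unfold negStep; decide
  rw [negDigits_cons 1 (by norm_num), h1, h2, negDigits_zero]
  rfl

theorem negDigits_negone : negDigits (-1) = [1, 1] := by
  have h1 : PySem.Int.mod (-1) 2 = 1 := by decide
  have h2 : negStep (-1) = 1 := by unfold negStep; decide
  rw [negDigits_cons (-1) (by norm_num), h1, h2, negDigits_one]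
  rfl

theorem negDigits_le_one (no : Int) : ∀ d ∈ negDigits no, d ≤ 1 := by
  fun_induction negDigits no with
  | case1 => simp
  | case2 no h ih =>
    intro d hd
    rcases List.mem_cons.mp hd with h1 | h2
    · have := (pvStepFacts no).1
      omega
    · exact ih d h2

theorem negDigits_lastOne (no : Int) (h : no ≠ 0) : (negDigits no).getLast? = some 1 := by
  fun_induction negDigits no with
  | case1 => simp_all
  | case2 no h0 ih =>
    by_cases hs : negStep no = 0
    · have hm : PySem.Int.mod no 2 = 1 := by
        have h1 := (pvStepFacts no).1
        have h2 := negStep_eq no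
        omega
      rw [hs, negDigits_zero, hm]
      rfl
    · rw [List.getLast?_cons, ih hs]
      rfl

-- value maps
def binVal : List Nat → Nat
  | [] => 0
  | d :: L => d + 2 * binVal L

def evalNeg : List Nat → Int
  | [] => 0
  | d :: L => (d : Int) - 2 * evalNeg L

theorem evalNeg_negDigits (no : Int) : evalNeg (negDigits no) = no := by
  fun_induction negDigits no with
  | case1 => simp [evalNeg]
  | case2 no h0 ih =>
    have h1 := (pvStepFacts no).1
    have h2 := negStep_eq no
    simp only [evalNeg, ih]
    omega

theorem negDigits_length (j : Nat) : ∀ no : Int, no.natAbs ≤ 2 ^ j → (negDigits no).length ≤ j + 2 := by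
  induction j with
  | zero =>
    intro no hno
    have hb1 : -1 ≤ no := by omega
    have hb2 : no ≤ 1 := by omega
    interval_cases no
    · rw [negDigits_negone]; simp
    · rw [negDigits_zero]; simp
    · rw [negDigits_one]; simp
  | succ j ih =>
    intro no hno
    by_cases h0 : no = 0
    · rw [h0, negDigits_zero]; simp
    rw [negDigits_cons no h0]
    have h1 := (pvStepFacts no).1
    have h2 := negStep_eq no
    have hs : (negStep no).natAbs ≤ 2 ^ j := by
      have hp : (2:Nat) ^ (j+1) = 2 * 2 ^ j := by ring
      omega
    have := ih (negStep no) hs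
    simp only [List.length_cons]
    omega

-- the mask 0b1010...10 with k one-bits
def maskN : Nat → Nat
  | 0 => 0
  | k + 1 => 2 + 4 * maskN k

theorem three_mul_maskN (k : Nat) : 3 * maskN k = 2 * (4 ^ k - 1) := by
  induction k with
  | zero => simp [maskN]
  | succ k ih =>
    have hp : (4:Nat) ^ (k+1) = 4 * 4 ^ k := by ring
    have h1 : 1 ≤ (4:Nat) ^ k := Nat.one_le_pow _ _ (by norm_num)
    simp only [maskN]
    omega

theorem maskN_eq (k : Nat) : (maskN k : Int) = PySem.Int.floordiv (2 * (4 ^ k - 1)) 3 := by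
  have h1 : 1 ≤ (4:Nat) ^ k := Nat.one_le_pow _ _ (by norm_num)
  have hc : (2 * ((4:Int) ^ k - 1)) = ((3 * maskN k : Nat) : Int) := by
    rw [three_mul_maskN]
    push_cast [h1]
    ring
  rw [hc]
  rw [show (3:Int) = ((3:Nat):Int) by norm_num]
  rw [PySem.Int.floordiv_natCast]
  norm_num

theorem xor_step (a b x y : Nat) (ha : a ≤ 1) (hb : b ≤ 1) :
    (a + 2 * x) ^^^ (b + 2 * y) = (a ^^^ b) + 2 * (x ^^^ y) := by
  rw [Nat.add_comm a, Nat.add_comm b, Nat.add_comm (a ^^^ b)]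
  interval_cases a <;> interval_cases b
  · simpa [Nat.bit_val] using Nat.xor_bit false x false y
  · simpa [Nat.bit_val] using Nat.xor_bit false x true y
  · simpa [Nat.bit_val] using Nat.xor_bit true x false y
  · simpa [Nat.bit_val] using Nat.xor_bit true x true y

-- the core identity: adding the mask then xoring it recovers the plain binary value
theorem mask_core (k : Nat) : ∀ L : List Nat, (∀ d ∈ L, d ≤ 1) → L.length ≤ 2 * k →
    0 ≤ evalNeg L + (maskN k : Int) ∧ (evalNeg L + (maskN k : Int)).toNat ^^^ maskN k = binVal L := by
  induction k with
  | zero =>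
    intro L _ hlen
    have hL : L = [] := List.eq_nil_of_length_eq_zero (by omega)
    subst hL
    simp [evalNeg, binVal, maskN]
  | succ k ih =>
    intro L hd hlen
    match L with
    | [] =>
      refine ⟨by simp [evalNeg], ?_⟩
      simp [evalNeg, binVal]
    | [d] =>
      have hd0 : d ≤ 1 := hd d (by simp)
      refine ⟨by simp [evalNeg]; omega, ?_⟩
      have h1 : (evalNeg [d] + ((maskN (k+1) : Nat) : Int)).toNat = d + 2 * (1 + 2 * maskN k) := by
        simp [evalNeg, maskN]
        omega
      rw [h1, show maskN (k+1) = 0 + 2 * (1 + 2 * maskN k) from by simp [maskN]; omega]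
      rw [xor_step d 0 _ _ hd0 (by norm_num)]
      simp [binVal]
    | d0 :: d1 :: L' =>
      have h0 : d0 ≤ 1 := hd _ (by simp)
      have h1 : d1 ≤ 1 := hd _ (by simp)
      have hd' : ∀ d ∈ L', d ≤ 1 := fun d hm => hd d (by simp [hm])
      have hlen' : L'.length ≤ 2 * k := by simp at hlen; omega
      obtain ⟨ihn, ihx⟩ := ih L' hd' hlen'
      have hval : evalNeg (d0 :: d1 :: L') + ((maskN (k+1) : Nat) : Int)
          = (d0 : Int) + 2 * (1 - (d1 : Int)) + 4 * (evalNeg L' + (maskN k : Int)) := by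
        simp [evalNeg, maskN]
        ring
      have htn : (evalNeg (d0 :: d1 :: L') + ((maskN (k+1) : Nat) : Int)).toNat
          = d0 + 2 * ((1 - d1) + 2 * (evalNeg L' + (maskN k : Int)).toNat) := by
        rw [hval]; omega
      refine ⟨by rw [hval]; omega, ?_⟩
      rw [htn, show maskN (k+1) = 0 + 2 * (1 + 2 * maskN k) from by simp [maskN]; omega]
      rw [xor_step d0 0 _ _ h0 (by norm_num)]
      rw [xor_step (1 - d1) 1 _ _ (by omega) (by norm_num)]
      rw [ihx, show (1 - d1) ^^^ 1 = d1 from by interval_cases d1 <;> decide]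
      simp [binVal]

-- characterize Nat.toDigits 2
def natBin (n : Nat) : List Char :=
  if n / 2 = 0 then [Nat.digitChar (n % 2)] else natBin (n / 2) ++ [Nat.digitChar (n % 2)]
decreasing_by exact Nat.bitwise_rec_lemma (by omega)

theorem toDigitsCore_eq (fuel : Nat) : ∀ n ds, n < fuel → Nat.toDigitsCore 2 fuel n ds = natBin n ++ ds := by
  induction fuel with
  | zero => intro n ds h; omega
  | succ fuel ih =>
    intro n ds h
    by_cases h2 : n / 2 = 0
    · rw [natBin]
      simp [Nat.toDigitsCore, h2]
    · have hlt : n / 2 < fuel := by omega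
      rw [natBin]
      simp only [Nat.toDigitsCore, if_neg h2]
      rw [ih _ _ hlt]
      simp [List.append_assoc]

theorem toDigits_eq (n : Nat) : Nat.toDigits 2 n = natBin n := by
  rw [Nat.toDigits, toDigitsCore_eq (n+1) n [] (by omega)]
  simp

theorem binVal_pos : ∀ L : List Nat, L.getLast? = some 1 → 1 ≤ binVal L
  | [] => by simp
  | [d] => by intro h; simp at h; simp [binVal, h]
  | d :: d' :: L => by
    intro h
    have := binVal_pos (d' :: L) (by rwa [List.getLast?_cons_cons] at h)
    simp [binVal] at this ⊢
    omega

theorem natBin_binVal : ∀ L : List Nat, (∀ d ∈ L, d ≤ 1) → L.getLast? = some 1 →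
    natBin (binVal L) = (L.map Nat.digitChar).reverse
  | [] => by simp
  | [d] => by
    intro _ h2
    simp at h2
    subst h2
    have hb : binVal [1] = 1 := by simp [binVal]
    rw [hb, natBin]
    simp
  | d :: d' :: L => by
    intro h1 h2
    have hd : d ≤ 1 := h1 _ (by simp)
    have h1' : ∀ x ∈ d' :: L, x ≤ 1 := fun x hx => h1 x (by simp at hx ⊢; tauto)
    have h2' : (d' :: L).getLast? = some 1 := by rwa [List.getLast?_cons_cons] at h2
    have hbp := binVal_pos (d' :: L) h2'
    have hb : binVal (d :: d' :: L) = d + 2 * binVal (d' :: L) := rfl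
    have hdiv : binVal (d :: d' :: L) / 2 = binVal (d' :: L) := by rw [hb]; omega
    have hmod : binVal (d :: d' :: L) % 2 = d := by rw [hb]; omega
    rw [natBin, if_neg (by omega), hdiv, hmod, natBin_binVal (d' :: L) h1' h2']
    simp

-- A-side: with enough fuel the loop produces the digit characters LSB-first after the accumulator
theorem dnLoop_eq : ∀ (fuel : Nat) (no : Int) (bi : List Char),
    2 * no.natAbs + (if no < 0 then 1 else 0) < fuel →
    dnLoop fuel no bi = bi ++ (negDigits no).map Nat.digitChar
  | 0, no, bi => by intro h; omega
  | fuel + 1, no, bi => by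
    intro hfuel
    rw [dnLoop]
    by_cases h0 : no = 0
    · subst h0; simp [negDigits_zero]
    by_cases h1 : no = 1
    · subst h1; rw [if_neg h0, if_pos rfl, negDigits_one]; rfl
    rw [if_neg h0, if_neg h1]
    have hdec := negStep_decr no h0
    have hrec : 2 * (negStep no).natAbs + (if negStep no < 0 then 1 else 0) < fuel := by
      split_ifs at hdec hfuel ⊢ <;> omega
    by_cases hm : PySem.Int.mod no 2 = 1
    · rw [if_pos hm]
      have hs : negStep no = PySem.Int.floordiv no (-2) + 1 := by unfold negStep; rw [if_pos hm]
      rw [← hs, dnLoop_eq fuel (negStep no) _ hrec, negDigits_cons no h0, hm]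
      simp
      decide
    · rw [if_neg hm]
      have hm0 : PySem.Int.mod no 2 = 0 := by
        have := (pvStepFacts no).1
        omega
      have hs : negStep no = PySem.Int.floordiv no (-2) := by unfold negStep; rw [if_neg hm]
      rw [← hs, dnLoop_eq fuel (negStep no) _ hrec, negDigits_cons no h0, hm0]
      simp
      decide

theorem d_n_eq (no : Int) : d_n no = String.ofList (((negDigits no).map Nat.digitChar).reverse) := by
  unfold d_n
  rw [PySem.List.slice?_none_none_neg_one]
  rw [dnLoop_eq (2 * no.natAbs + 2) no [] (by split_ifs <;> omega)]
  simp

theorem d_n_alt_eq (no : Int) : d_n_alt no = String.ofList (((negDigits no).map Nat.digitChar).reverse) := by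
  by_cases h0 : no = 0
  · subst h0
    simp [d_n_alt, negDigits_zero]
  · unfold d_n_alt
    rw [if_neg h0]
    show PySem.Str.slice (PySem.Int.pyBin (PySem.Int.bxor
        (no + PySem.Int.floordiv (2 * (4 ^ (PySem.Int.bitLength no / 2 + 2) - 1)) 3)
        (PySem.Int.floordiv (2 * (4 ^ (PySem.Int.bitLength no / 2 + 2) - 1)) 3))) (some 2) none = _
    have hlen : (negDigits no).length ≤ 2 * (PySem.Int.bitLength no / 2 + 2) := by
      have hb := PySem.Int.lt_two_pow_bitLength no
      have h1 := negDigits_length (PySem.Int.bitLength no) no (by omega)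
      omega
    obtain ⟨hnn, hxor⟩ := mask_core (PySem.Int.bitLength no / 2 + 2) (negDigits no)
      (negDigits_le_one no) hlen
    rw [evalNeg_negDigits no] at hnn hxor
    rw [← maskN_eq (PySem.Int.bitLength no / 2 + 2)]
    have hx : PySem.Int.bxor (no + ((maskN (PySem.Int.bitLength no / 2 + 2) : Nat) : Int))
        ((maskN (PySem.Int.bitLength no / 2 + 2) : Nat) : Int)
        = ((binVal (negDigits no) : Nat) : Int) := by
      rw [PySem.Int.bxor_of_nonneg hnn (by positivity), Int.toNat_natCast, hxor]
    rw [hx]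
    show String.ofList (PySem.List.slice (PySem.Int.pyBin _).toList (some 2) none) = _
    rw [PySem.Int.toList_pyBin]
    have hbc : PySem.Int.toBinChars0b ((binVal (negDigits no) : Nat) : Int)
        = '0' :: 'b' :: Nat.toDigits 2 (binVal (negDigits no)) := by
      simp [PySem.Int.toBinChars0b]
    rw [hbc, PySem.List.slice_from _ (by norm_num : (0:Int) ≤ 2)]
    rw [toDigits_eq, natBin_binVal (negDigits no) (negDigits_le_one no) (negDigits_lastOne no h0)]
    rfl

-- ===== VERDICT (by name: the statement is the Claim_ definition above) =====
theorem d_n_spec : Claim_equal_d_n := by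
  intro no _
  unfold Spec_d_n
  rw [d_n_eq, d_n_alt_eq]
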